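-- pv_equiv track=rewrite | github.com/Nidhood/Algorithm_analysis | taller_4/taller_4/heuristic_solver.py | infer_from_assignments
-- ===== SOURCE A (Python) =====
-- def infer_from_assignments(valid_assignments, all_hidden):
--     safe_moves = set(all_hidden)
--     certain_mines = set()
--
--     if not valid_assignments:
--         return set(), set()
--
--     # Encontrar casillas que siempre son minas
--     for cell in all_hidden:
--         if all(cell in assignment for assignment in valid_assignments):
--             certain_mines.add(cell)
--
--     # Encontrar casillas que nunca son minas
--     for cell in all_hidden:
--         if all(cell not in assignment for assignment in valid_assignments):
--             safe_moves.add(cell)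
--
--     return safe_moves, certain_mines
-- ===== SOURCE B (Python) =====
-- def infer_from_assignments(valid_assignments, all_hidden):
--     if not valid_assignments:
--         return set(), set()
--     # intersection of all assignments, built once
--     common = set(valid_assignments[0])
--     for assignment in valid_assignments[1:]:
--         common.intersection_update(assignment)
--     certain_mines = {cell for cell in all_hidden if cell in common}
--     # every hidden cell is already in set(all_hidden); A's second loop never adds anything new
--     return set(all_hidden), certain_mines
-- ===== Notes on version B (the rewrite author's own statement) =====
-- stated objective: faster
-- what changed: B builds the intersection of all assignments once and tests each hidden cell against it, instead of scanning every assignment per hidden cell; it also drops A's second loop, whose additions are always already in set(all_hidden).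
import Mathlib
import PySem

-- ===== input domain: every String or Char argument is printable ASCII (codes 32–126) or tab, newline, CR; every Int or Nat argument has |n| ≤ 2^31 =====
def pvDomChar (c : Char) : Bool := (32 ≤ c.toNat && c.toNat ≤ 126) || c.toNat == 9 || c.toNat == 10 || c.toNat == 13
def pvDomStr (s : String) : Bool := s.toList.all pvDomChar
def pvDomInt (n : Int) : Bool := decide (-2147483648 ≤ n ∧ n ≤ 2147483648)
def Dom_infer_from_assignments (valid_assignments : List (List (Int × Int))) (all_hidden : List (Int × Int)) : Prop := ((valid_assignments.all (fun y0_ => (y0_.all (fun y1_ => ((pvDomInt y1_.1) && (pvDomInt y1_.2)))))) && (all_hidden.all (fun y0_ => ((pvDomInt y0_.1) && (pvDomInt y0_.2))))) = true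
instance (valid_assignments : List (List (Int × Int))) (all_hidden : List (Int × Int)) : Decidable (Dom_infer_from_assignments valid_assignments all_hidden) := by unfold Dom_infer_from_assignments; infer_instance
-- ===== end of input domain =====

-- B computes the intersection of all assignments once and checks each hidden cell against it
-- (and drops A's redundant second loop), instead of scanning every assignment per hidden cell.


-- ===== PORT A =====
def infer_from_assignments (valid_assignments : List (List (Int × Int))) (all_hidden : List (Int × Int)) : (List (Int × Int)) × (List (Int × Int)) :=
  let safe_moves : PySem.Set (Int × Int) := PySem.Set.ofList all_hidden
  let certain_mines : PySem.Set (Int × Int) := PySem.Set.empty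
  if valid_assignments.isEmpty then (PySem.Set.empty, PySem.Set.empty)
  else
    let certain_mines := all_hidden.foldl
      (fun s cell => if valid_assignments.all (fun a => a.contains cell) then PySem.Set.add s cell else s)
      certain_mines
    let safe_moves := all_hidden.foldl
      (fun s cell => if valid_assignments.all (fun a => !(a.contains cell)) then PySem.Set.add s cell else s)
      safe_moves
    (safe_moves, certain_mines)

-- ===== PORT B =====
def infer_from_assignments_alt (valid_assignments : List (List (Int × Int))) (all_hidden : List (Int × Int)) : (List (Int × Int)) × (List (Int × Int)) :=
  match valid_assignments with
  | [] => (PySem.Set.empty, PySem.Set.empty)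
  | h :: t =>
    let common : PySem.Set (Int × Int) := t.foldl PySem.Set.inter (PySem.Set.ofList h)
    let certain_mines := all_hidden.foldl
      (fun s cell => if PySem.Set.contains common cell then PySem.Set.add s cell else s)
      PySem.Set.empty
    (PySem.Set.ofList all_hidden, certain_mines)

-- ===== PRECONDITION & SPEC =====
def Spec_infer_from_assignments (valid_assignments : List (List (Int × Int))) (all_hidden : List (Int × Int)) (out : (List (Int × Int)) × (List (Int × Int))) : Prop := out = infer_from_assignments_alt valid_assignments all_hidden
instance (valid_assignments : List (List (Int × Int))) (all_hidden : List (Int × Int)) (out : (List (Int × Int)) × (List (Int × Int))) : Decidable (Spec_infer_from_assignments valid_assignments all_hidden out) := by unfold Spec_infer_from_assignments; infer_instance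

-- ===== CLAIM (what is proved, stated in full; the proofs are below) =====
def Claim_equal_infer_from_assignments : Prop := ∀ (valid_assignments : List (List (Int × Int))) (all_hidden : List (Int × Int)), Dom_infer_from_assignments valid_assignments all_hidden → Spec_infer_from_assignments valid_assignments all_hidden (infer_from_assignments valid_assignments all_hidden)

-- ===== LEMMAS AND PROOFS =====

-- membership in the folded intersection = membership in every assignment
lemma mem_foldl_inter (t : List (List (Int × Int))) (s : PySem.Set (Int × Int)) (c : Int × Int) :
    c ∈ t.foldl PySem.Set.inter s ↔ c ∈ s ∧ ∀ a ∈ t, c ∈ a := by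
  induction t generalizing s with
  | nil => simp
  | cons a t ih =>
    simp [List.foldl_cons, ih, PySem.Set.mem_inter]
    tauto

-- a fold that only ever adds elements already present in s leaves s unchanged
lemma foldl_add_if_mem (p : Int × Int → Bool) (l : List (Int × Int)) (s : PySem.Set (Int × Int))
    (h : ∀ c ∈ l, c ∈ s) :
    l.foldl (fun s c => if p c then PySem.Set.add s c else s) s = s := by
  induction l with
  | nil => rfl
  | cons c l ih =>
    have hc : c ∈ s := h c (by simp)
    simp only [List.foldl_cons]
    have hrest := ih (fun x hx => h x (by simp [hx]))
    by_cases hp : p c = true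
    · rw [if_pos hp, PySem.Set.add_of_mem hc]; exact hrest
    · rw [if_neg hp]; exact hrest

-- the per-cell condition of A's first loop equals B's membership test in the intersection
lemma cond_eq (h : List (Int × Int)) (t : List (List (Int × Int))) (c : Int × Int) :
    (h :: t).all (fun a => a.contains c)
      = PySem.Set.contains (t.foldl PySem.Set.inter (PySem.Set.ofList h)) c := by
  have := mem_foldl_inter t (PySem.Set.ofList h) c
  simp only [PySem.Set.mem_ofList] at this
  rw [Bool.eq_iff_iff]
  simp only [List.all_eq_true, List.contains_iff_mem, PySem.Set.contains_iff, this]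
  constructor
  · intro hall; exact ⟨hall h (by simp), fun a ha => hall a (by simp [ha])⟩
  · rintro ⟨h1, h2⟩ a ha
    rcases List.mem_cons.mp ha with rfl | ha
    · exact h1
    · exact h2 a ha

-- ===== VERDICT (by name: the statement is the Claim_ definition above) =====
theorem infer_from_assignments_spec : Claim_equal_infer_from_assignments := by
  intro va ah _
  unfold Spec_infer_from_assignments
  cases va with
  | nil => rfl
  | cons h t =>
    simp only [infer_from_assignments, infer_from_assignments_alt, List.isEmpty_cons,
      Bool.false_eq_true, if_false]
    refine Prod.ext ?_ ?_
    · exact foldl_add_if_mem _ ah (PySem.Set.ofList ah)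
        (fun c hc => (PySem.Set.mem_ofList ah c).mpr hc)
    · have hfun : (fun (s : PySem.Set (Int × Int)) cell =>
          if (h :: t).all (fun a => a.contains cell) then PySem.Set.add s cell else s)
        = (fun s cell =>
          if PySem.Set.contains (t.foldl PySem.Set.inter (PySem.Set.ofList h)) cell
          then PySem.Set.add s cell else s) := by
        funext s cell; rw [cond_eq]
      rw [hfun]
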